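-- pv_equiv track=rewrite | github.com/jcolinpatrick/kryptos | scripts/grille/e_z340_diagonal.py | segmented_decimation
-- ===== SOURCE A (Python) =====
-- def toroidal_walk(nrows, ncols, dr, dc, start_r=0, start_c=0):
--     """Generate a toroidal walk permutation: step (dr, dc) on an nrows x ncols grid.
--     Returns list of (row, col) positions in walk order."""
--     total = nrows * ncols
--     visited = set()
--     path = []
--     r, c = start_r, start_c
--     for _ in range(total):
--         if (r, c) in visited:
--             # Find next unvisited cell (row-major)
--             found = False
--             for rr in range(nrows):
--                 for cc in range(ncols):
--                     if (rr, cc) not in visited: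
--                         r, c = rr, cc
--                         found = True
--                         break
--                 if found:
--                     break
--             if not found:
--                 break
--         visited.add((r, c))
--         path.append((r, c))
--         r = (r + dr) % nrows
--         c = (c + dc) % ncols
--     return path
--
-- def segmented_decimation(nrows, ncols, segments, dr, dc):
--     """Z340-style: split grid into horizontal segments, apply decimation to each.
--     segments: list of row counts, e.g. [9, 9, 2] for Z340.
--     dr, dc: decimation step within each segment.
--     """
--     path = []
--     row_offset = 0
--     for seg_rows in segments:
--         seg_path = toroidal_walk(seg_rows, ncols, dr, dc)
--         for r, c in seg_path:
--             path.append((r + row_offset, c))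
--         row_offset += seg_rows
--     return path
-- ===== SOURCE B (Python) =====
-- def _walk(nrows, ncols, dr, dc):
--     """Toroidal decimation walk from (0,0); on revisit jump to the first
--     unvisited cell in row-major order, found by a monotone pointer instead
--     of a full rescan (the first-unvisited index only moves forward)."""
--     ncells = nrows * ncols if nrows > 0 and ncols > 0 else 0
--     total = nrows * ncols
--     visited = set()
--     path = []
--     r, c = 0, 0
--     ptr = 0  # row-major index: every cell with index < ptr is visited
--     for _ in range(total):
--         if (r, c) in visited:
--             while ptr < ncells and (ptr // ncols, ptr % ncols) in visited:
--                 ptr += 1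
--             if ptr == ncells:
--                 break
--             r, c = ptr // ncols, ptr % ncols
--         visited.add((r, c))
--         path.append((r, c))
--         r = (r + dr) % nrows
--         c = (c + dc) % ncols
--     return path
--
-- def segmented_decimation(nrows, ncols, segments, dr, dc):
--     path = []
--     row_offset = 0
--     for seg_rows in segments:
--         path.extend((r + row_offset, c) for r, c in _walk(seg_rows, ncols, dr, dc))
--         row_offset += seg_rows
--     return path
-- ===== Notes on version B (the rewrite author's own statement) =====
-- stated objective: alternative
-- what changed: B replaces A's nested row-major rescan of the whole grid on every revisit by a single monotone pointer over the row-major cell indices (the first-unvisited index never moves backward), so the rescan loops disappear and each cell index is inspected at most once per segment.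
import Mathlib
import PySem

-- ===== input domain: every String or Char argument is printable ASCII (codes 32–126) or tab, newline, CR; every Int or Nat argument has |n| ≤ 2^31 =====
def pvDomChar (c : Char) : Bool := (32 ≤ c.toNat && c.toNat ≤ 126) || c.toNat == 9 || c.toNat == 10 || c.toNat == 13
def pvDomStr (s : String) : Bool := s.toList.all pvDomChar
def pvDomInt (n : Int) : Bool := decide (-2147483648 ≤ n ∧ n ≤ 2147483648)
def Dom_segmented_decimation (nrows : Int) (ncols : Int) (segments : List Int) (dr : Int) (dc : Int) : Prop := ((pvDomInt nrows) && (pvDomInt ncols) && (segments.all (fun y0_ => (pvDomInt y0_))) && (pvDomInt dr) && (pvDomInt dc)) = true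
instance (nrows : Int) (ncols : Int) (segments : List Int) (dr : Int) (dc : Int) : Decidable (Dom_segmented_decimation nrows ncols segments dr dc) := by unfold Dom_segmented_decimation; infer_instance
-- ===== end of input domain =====

-- B replaces A's nested row-major rescan of the whole grid on each revisit by a
-- monotone pointer over the row-major cell indices (the first-unvisited index
-- never moves backward); same return value, different traversal mechanism.

-- ===== PORT A =====
-- nested 'for rr in range(nrows): for cc in range(ncols): … break' with a found flag:
-- Option accumulator short-circuits exactly like the flag+break
def pvFindUnvisited (nrows ncols : Int) (visited : PySem.Set (Int × Int)) : Option (Int × Int) :=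
  (PySem.List.pyRange 0 nrows 1).foldl
    (fun acc rr =>
      match acc with
      | some p => some p
      | none =>
        (PySem.List.pyRange 0 ncols 1).foldl
          (fun acc2 cc =>
            match acc2 with
            | some p => some p
            | none => if PySem.Set.contains visited (rr, cc) then none else some (rr, cc))
          none)
    none

-- the body of 'for _ in range(total)' in toroidal_walk; 'break' = early return of path
def pvWalkLoopA (nrows ncols dr dc : Int) :
    Nat → PySem.Set (Int × Int) → List (Int × Int) → Int → Int → List (Int × Int)
  | 0, _, path, _, _ => path
  | Nat.succ m, visited, path, r, c =>
    let step := fun (r c : Int) =>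
      pvWalkLoopA nrows ncols dr dc m (PySem.Set.add visited (r, c)) (path ++ [(r, c)])
        (PySem.Int.mod (r + dr) nrows) (PySem.Int.mod (c + dc) ncols)
    if PySem.Set.contains visited (r, c) then
      match pvFindUnvisited nrows ncols visited with
      | none => path
      | some (r', c') => step r' c'
    else step r c

def pvToroidalWalk (nrows ncols dr dc : Int) : List (Int × Int) :=
  pvWalkLoopA nrows ncols dr dc (nrows * ncols).toNat PySem.Set.empty [] 0 0

def segmented_decimation (nrows : Int) (ncols : Int) (segments : List Int) (dr : Int) (dc : Int) : List (Int × Int) :=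
  (segments.foldl
    (fun (st : List (Int × Int) × Int) seg_rows =>
      let seg_path := pvToroidalWalk seg_rows ncols dr dc
      (seg_path.foldl (fun p rc => p ++ [(rc.1 + st.2, rc.2)]) st.1, st.2 + seg_rows))
    ([], 0)).1

-- ===== PORT B =====
-- 'while ptr < ncells and cell(ptr) in visited: ptr += 1', fuel = ncells - ptr
def pvAdvancePtr (ncols : Int) (visited : PySem.Set (Int × Int)) : Nat → Int → Int
  | 0, ptr => ptr
  | Nat.succ f, ptr =>
    if PySem.Set.contains visited (PySem.Int.floordiv ptr ncols, PySem.Int.mod ptr ncols) then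
      pvAdvancePtr ncols visited f (ptr + 1)
    else ptr

def pvWalkLoopB (nrows ncols dr dc ncells : Int) :
    Nat → PySem.Set (Int × Int) → List (Int × Int) → Int → Int → Int → List (Int × Int)
  | 0, _, path, _, _, _ => path
  | Nat.succ m, visited, path, r, c, ptr =>
    if PySem.Set.contains visited (r, c) then
      let ptr' := pvAdvancePtr ncols visited (ncells - ptr).toNat ptr
      if ptr' = ncells then path
      else
        let r' := PySem.Int.floordiv ptr' ncols
        let c' := PySem.Int.mod ptr' ncols
        pvWalkLoopB nrows ncols dr dc ncells m (PySem.Set.add visited (r', c')) (path ++ [(r', c')])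
          (PySem.Int.mod (r' + dr) nrows) (PySem.Int.mod (c' + dc) ncols) ptr'
    else
      pvWalkLoopB nrows ncols dr dc ncells m (PySem.Set.add visited (r, c)) (path ++ [(r, c)])
        (PySem.Int.mod (r + dr) nrows) (PySem.Int.mod (c + dc) ncols) ptr

def pvWalkB (nrows ncols dr dc : Int) : List (Int × Int) :=
  let ncells : Int := if 0 < nrows ∧ 0 < ncols then nrows * ncols else 0
  pvWalkLoopB nrows ncols dr dc ncells (nrows * ncols).toNat PySem.Set.empty [] 0 0 0

def segmented_decimation_alt (nrows : Int) (ncols : Int) (segments : List Int) (dr : Int) (dc : Int) : List (Int × Int) :=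
  (segments.foldl
    (fun (st : List (Int × Int) × Int) seg_rows =>
      (st.1 ++ (pvWalkB seg_rows ncols dr dc).map (fun rc => (rc.1 + st.2, rc.2)), st.2 + seg_rows))
    ([], 0)).1

-- ===== PRECONDITION & SPEC =====
def Spec_segmented_decimation (nrows : Int) (ncols : Int) (segments : List Int) (dr : Int) (dc : Int) (out : List (Int × Int)) : Prop := out = segmented_decimation_alt nrows ncols segments dr dc
instance (nrows : Int) (ncols : Int) (segments : List Int) (dr : Int) (dc : Int) (out : List (Int × Int)) : Decidable (Spec_segmented_decimation nrows ncols segments dr dc out) := by unfold Spec_segmented_decimation; infer_instance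

-- ===== CLAIM (what is proved, stated in full; the proofs are below) =====
def Claim_equal_segmented_decimation : Prop := ∀ (nrows : Int) (ncols : Int) (segments : List Int) (dr : Int) (dc : Int), Dom_segmented_decimation nrows ncols segments dr dc → Spec_segmented_decimation nrows ncols segments dr dc (segmented_decimation nrows ncols segments dr dc)

-- ===== LEMMAS AND PROOFS =====

-- row-major cell of index i
def pvCell (ncols i : Int) : Int × Int := (PySem.Int.floordiv i ncols, PySem.Int.mod i ncols)

-- an Option-accumulator foldl that keeps the first `some` is findSome?
theorem pv_foldl_option {α β : Type} (g : Option β → α → Option β) (f : α → Option β)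
    (xs : List α) (init : Option β)
    (hg1 : ∀ p x, g (some p) x = some p) (hg2 : ∀ x, g none x = f x) :
    xs.foldl g init = (match init with | some p => some p | none => xs.findSome? f) := by
  induction xs generalizing init with
  | nil => cases init <;> simp
  | cons x xs ih =>
    cases init with
    | some p => simp only [List.foldl_cons, hg1, ih, List.findSome?_cons]
    | none =>
      simp only [List.foldl_cons, hg2, ih, List.findSome?_cons]
      cases h : f x <;> simp [h]

theorem pv_find_eq_findSome? (nrows ncols : Int) (visited : PySem.Set (Int × Int)) :
    pvFindUnvisited nrows ncols visited
      = (PySem.List.pyRange 0 nrows 1).findSome? (fun rr =>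
          (PySem.List.pyRange 0 ncols 1).findSome? (fun cc =>
            if PySem.Set.contains visited (rr, cc) then none else some (rr, cc))) := by
  unfold pvFindUnvisited
  exact pv_foldl_option _ _ _ none (fun p x => rfl)
    (fun rr => pv_foldl_option _ _ _ none (fun p x => rfl) (fun cc => rfl))

-- skipping a prefix on which f is none
theorem pv_findSome?_pyRange_skip {β : Type} (a b j : Int) (f : Int → Option β)
    (haj : a ≤ j) (h : ∀ x, a ≤ x → x < j → f x = none) :
    (PySem.List.pyRange a b 1).findSome? f = (PySem.List.pyRange j b 1).findSome? f := by
  rcases eq_or_lt_of_le haj with rfl | hlt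
  · rfl
  · by_cases hba : b ≤ a
    · rw [PySem.List.pyRange_one_eq_nil hba, PySem.List.pyRange_one_eq_nil (by omega)]
    · have hab : a < b := by omega
      rw [PySem.List.pyRange_one_cons hab, List.findSome?_cons, h a le_rfl hlt]
      exact pv_findSome?_pyRange_skip (a + 1) b j f (by omega) (fun x h1 h2 => h x (by omega) h2)
termination_by (j - a).toNat
decreasing_by omega

-- decomposition of a row-major index (0 < ncols)
theorem pv_cell_encode (ncols rr cc : Int) (hc : 0 < ncols) (h0 : 0 ≤ cc) (h1 : cc < ncols) :
    pvCell ncols (rr * ncols + cc) = (rr, cc) := by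
  have hd : PySem.Int.floordiv (rr * ncols + cc) ncols = rr := by
    rw [PySem.Int.floordiv_eq_iff_of_pos hc]
    constructor <;> nlinarith
  have hm := PySem.Int.floordiv_mul_add_mod (rr * ncols + cc) ncols
  rw [hd] at hm
  simp only [pvCell, hd, Prod.mk.injEq]
  exact ⟨trivial, by linarith⟩

theorem pv_cell_decomp (ncols j : Int) (hc : 0 < ncols) :
    (pvCell ncols j).1 * ncols + (pvCell ncols j).2 = j ∧
      0 ≤ (pvCell ncols j).2 ∧ (pvCell ncols j).2 < ncols := by
  exact ⟨PySem.Int.floordiv_mul_add_mod j ncols, PySem.Int.mod_nonneg j hc, PySem.Int.mod_lt j hc⟩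

-- pvFindUnvisited = none when every cell of the grid (= every index < ncells) is visited
theorem pv_find_none (nrows ncols ncells : Int) (visited : PySem.Set (Int × Int))
    (hnc : ncells = if 0 < nrows ∧ 0 < ncols then nrows * ncols else 0)
    (hall : ∀ i : Int, 0 ≤ i → i < ncells → pvCell ncols i ∈ visited) :
    pvFindUnvisited nrows ncols visited = none := by
  rw [pv_find_eq_findSome?]
  by_cases hr : nrows ≤ 0
  · rw [PySem.List.pyRange_one_eq_nil hr]; rfl
  · have hrpos : 0 < nrows := by omega
    have hrow : ∀ rr : Int, 0 ≤ rr → rr < nrows →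
        ((PySem.List.pyRange 0 ncols 1).findSome? (fun cc =>
            if PySem.Set.contains visited (rr, cc) then none else some (rr, cc))) = none := by
      intro rr hrr0 hrr1
      by_cases hcpos : 0 < ncols
      · rw [pv_findSome?_pyRange_skip 0 ncols ncols _ (by omega) ?_,
            PySem.List.pyRange_one_eq_nil le_rfl]
        · rfl
        · intro cc h1 h2
          have hi0 : (0:Int) ≤ rr * ncols + cc := by positivity
          have hilt : rr * ncols + cc < ncells := by
            rw [hnc, if_pos ⟨hrpos, hcpos⟩]; nlinarith
          have hmm := hall _ hi0 hilt
          rw [pv_cell_encode ncols rr cc hcpos h1 h2] at hmm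
          rw [if_pos ((PySem.Set.contains_iff _ _).mpr hmm)]
      · rw [PySem.List.pyRange_one_eq_nil (by omega)]; rfl
    rw [pv_findSome?_pyRange_skip 0 nrows nrows _ (by omega) hrow,
        PySem.List.pyRange_one_eq_nil le_rfl]
    rfl

-- pvFindUnvisited finds the first (row-major) unvisited cell
theorem pv_find_first (nrows ncols j : Int) (visited : PySem.Set (Int × Int))
    (hr : 0 < nrows) (hc : 0 < ncols) (h0 : 0 ≤ j) (h1 : j < nrows * ncols)
    (hbefore : ∀ i : Int, 0 ≤ i → i < j → pvCell ncols i ∈ visited)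
    (hj : pvCell ncols j ∉ visited) :
    pvFindUnvisited nrows ncols visited = some (pvCell ncols j) := by
  obtain ⟨hdec, hc0, hc1⟩ := pv_cell_decomp ncols j hc
  have hrr0 : 0 ≤ (pvCell ncols j).1 := by nlinarith
  have hrr1 : (pvCell ncols j).1 < nrows := by nlinarith
  have hvis : ∀ rr'' cc'' : Int, 0 ≤ rr'' → 0 ≤ cc'' → cc'' < ncols →
      rr'' * ncols + cc'' < j → PySem.Set.contains visited (rr'', cc'') = true := by
    intro rr'' cc'' ha hb hcj hlt
    have hmm := hbefore _ (by positivity) hlt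
    rw [pv_cell_encode ncols rr'' cc'' hc hb hcj] at hmm
    exact (PySem.Set.contains_iff _ _).mpr hmm
  rw [pv_find_eq_findSome?]
  rw [pv_findSome?_pyRange_skip 0 nrows (pvCell ncols j).1 _ hrr0 ?_]
  · rw [PySem.List.pyRange_one_cons hrr1, List.findSome?_cons]
    rw [pv_findSome?_pyRange_skip 0 ncols (pvCell ncols j).2 _ hc0 ?_]
    · rw [PySem.List.pyRange_one_cons hc1, List.findSome?_cons]
      have hcontains : PySem.Set.contains visited ((pvCell ncols j).1, (pvCell ncols j).2) = false := by
        rw [Bool.eq_false_iff]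
        intro hx
        exact hj ((PySem.Set.contains_iff _ _).mp hx)
      rw [hcontains]
      rfl
    · intro cc hx1 hx2
      rw [hvis _ _ hrr0 hx1 (by omega) (by omega)]
      rfl
  · intro rr hx1 hx2
    rw [pv_findSome?_pyRange_skip 0 ncols ncols _ (by omega) ?_,
        PySem.List.pyRange_one_eq_nil le_rfl]
    · rfl
    · intro cc hy1 hy2
      rw [hvis _ _ hx1 hy1 hy2 (by nlinarith)]
      rfl

-- what the monotone pointer computes
theorem pv_advance_spec (ncols ncells : Int) (visited : PySem.Set (Int × Int)) :
    ∀ (fuel : Nat) (ptr : Int), 0 ≤ ptr → ptr + fuel = ncells →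
      (∀ i : Int, 0 ≤ i → i < ptr → pvCell ncols i ∈ visited) →
      (ptr ≤ pvAdvancePtr ncols visited fuel ptr ∧
        pvAdvancePtr ncols visited fuel ptr ≤ ncells ∧
        (∀ i : Int, 0 ≤ i → i < pvAdvancePtr ncols visited fuel ptr → pvCell ncols i ∈ visited) ∧
        (pvAdvancePtr ncols visited fuel ptr < ncells →
          pvCell ncols (pvAdvancePtr ncols visited fuel ptr) ∉ visited)) := by
  intro fuel
  induction fuel with
  | zero =>
    intro ptr h0 hsum hbef
    simp only [pvAdvancePtr]
    refine ⟨le_rfl, by omega, hbef, fun hlt => absurd hlt (by omega)⟩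
  | succ f ih =>
    intro ptr h0 hsum hbef
    simp only [pvAdvancePtr]
    by_cases hmem : PySem.Set.contains visited (PySem.Int.floordiv ptr ncols, PySem.Int.mod ptr ncols) = true
    · rw [if_pos hmem]
      have hmem' : pvCell ncols ptr ∈ visited := (PySem.Set.contains_iff _ _).mp hmem
      have hbef' : ∀ i : Int, 0 ≤ i → i < ptr + 1 → pvCell ncols i ∈ visited := by
        intro i hi1 hi2
        rcases lt_or_eq_of_le (by omega : i ≤ ptr) with hi | rfl
        · exact hbef i hi1 hi
        · exact hmem'
      obtain ⟨q1, q2, q3, q4⟩ := ih (ptr + 1) (by omega) (by push_cast at hsum ⊢; omega) hbef'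
      exact ⟨by omega, q2, q3, q4⟩
    · rw [if_neg hmem]
      refine ⟨le_rfl, by push_cast at hsum; omega, hbef, fun _ => ?_⟩
      exact fun hmm => hmem ((PySem.Set.contains_iff _ _).mpr hmm)

theorem pv_loop_eq (nrows ncols dr dc ncells : Int)
    (hnc : ncells = if 0 < nrows ∧ 0 < ncols then nrows * ncols else 0) :
    ∀ (n : Nat) (visited : PySem.Set (Int × Int)) (path : List (Int × Int)) (r c ptr : Int),
      0 ≤ ptr → ptr ≤ ncells →
      (∀ i : Int, 0 ≤ i → i < ptr → pvCell ncols i ∈ visited) →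
      pvWalkLoopA nrows ncols dr dc n visited path r c
        = pvWalkLoopB nrows ncols dr dc ncells n visited path r c ptr := by
  intro n
  induction n with
  | zero => intro visited path r c ptr _ _ _; rfl
  | succ m ih =>
    intro visited path r c ptr hp0 hp1 hinv
    simp only [pvWalkLoopA, pvWalkLoopB]
    by_cases hmem : PySem.Set.contains visited (r, c) = true
    · rw [if_pos hmem, if_pos hmem]
      have hfuel : ptr + ((ncells - ptr).toNat : Int) = ncells := by omega
      obtain ⟨q1, q2, q3, q4⟩ :=
        pv_advance_spec ncols ncells visited (ncells - ptr).toNat ptr hp0 hfuel hinv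
      set q := pvAdvancePtr ncols visited (ncells - ptr).toNat ptr with hq
      by_cases hqe : q = ncells
      · rw [if_pos hqe, pv_find_none nrows ncols ncells visited hnc (hqe ▸ q3)]
      · rw [if_neg hqe]
        have hqlt : q < ncells := lt_of_le_of_ne q2 hqe
        have hpos : 0 < nrows ∧ 0 < ncols := by
          by_contra hnp
          rw [hnc, if_neg hnp] at hqlt
          omega
        have hfind := pv_find_first nrows ncols q visited hpos.1 hpos.2 (by omega)
          (by rwa [hnc, if_pos hpos] at hqlt) q3 (q4 hqlt)
        rw [hfind]
        exact ih _ _ _ _ q (by omega) q2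
          (fun i hi1 hi2 => by
            simp only [PySem.Set.mem_add]
            exact Or.inl (q3 i hi1 hi2))
    · rw [if_neg hmem, if_neg hmem]
      exact ih _ _ _ _ ptr hp0 hp1
        (fun i hi1 hi2 => by
          simp only [PySem.Set.mem_add]
          exact Or.inl (hinv i hi1 hi2))

theorem pv_walk_eq (nrows ncols dr dc : Int) :
    pvToroidalWalk nrows ncols dr dc = pvWalkB nrows ncols dr dc := by
  unfold pvToroidalWalk pvWalkB
  apply pv_loop_eq nrows ncols dr dc _ rfl _ _ _ _ _ 0 le_rfl
  · split
    · rename_i h; exact mul_nonneg (le_of_lt h.1) (le_of_lt h.2)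
    · exact le_rfl
  · intro i hi1 hi2; omega

-- ===== VERDICT (by name: the statement is the Claim_ definition above) =====
theorem segmented_decimation_spec : Claim_equal_segmented_decimation := by
  intro nrows ncols segments dr dc _
  unfold Spec_segmented_decimation segmented_decimation segmented_decimation_alt
  have hfun : (fun (st : List (Int × Int) × Int) (seg_rows : Int) =>
        let seg_path := pvToroidalWalk seg_rows ncols dr dc
        (seg_path.foldl (fun p rc => p ++ [(rc.1 + st.2, rc.2)]) st.1, st.2 + seg_rows))
      = (fun (st : List (Int × Int) × Int) (seg_rows : Int) =>
        (st.1 ++ (pvWalkB seg_rows ncols dr dc).map (fun rc => (rc.1 + st.2, rc.2)), st.2 + seg_rows)) := by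
    funext st seg_rows
    simp only [pv_walk_eq, PySem.List.foldl_append_singleton_eq_map]
  rw [hfun]
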